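-- pv_equiv track=rewrite | github.com/banana-galaxy/challenges | challenge18(apple_boxes)/solutions/VRTheKing.py | solution
-- ===== SOURCE A (Python) =====
-- def solution(k):
--     yellow = 0
--     red = 0
--
--     for i in range(1, k+1):
--         if i%2 ==0:
--             red += i*i
--         else:
--             yellow += i*i
--     return red - yellow
-- ===== SOURCE B (Python) =====
-- def solution(k):
--     if k < 1:
--         return 0
--     t = k * (k + 1) // 2
--     return t if k % 2 == 0 else -t
-- ===== Notes on version B (the rewrite author's own statement) =====
-- stated objective: faster
-- what changed: Replaced the linear loop accumulating even and odd squares separately with the closed-form halved product of k and its successor, negated for odd k.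
import Mathlib
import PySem

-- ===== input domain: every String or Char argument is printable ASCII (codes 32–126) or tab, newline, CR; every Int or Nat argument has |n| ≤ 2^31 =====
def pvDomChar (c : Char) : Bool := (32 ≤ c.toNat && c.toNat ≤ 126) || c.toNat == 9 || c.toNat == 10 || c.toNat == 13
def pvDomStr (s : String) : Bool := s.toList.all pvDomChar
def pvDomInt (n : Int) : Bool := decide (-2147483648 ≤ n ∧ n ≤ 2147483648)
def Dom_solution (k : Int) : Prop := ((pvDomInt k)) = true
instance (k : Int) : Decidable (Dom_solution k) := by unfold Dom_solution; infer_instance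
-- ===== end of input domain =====

-- B replaces A's linear accumulation loop with the closed-form signed triangular number (halved product of k and its successor), negated for odd k (objective: faster, asymptotic).

-- ===== PORT A =====
-- the loop body: state (yellow, red), i the loop variable
def solutionStep (s : Int × Int) (i : Int) : Int × Int :=
  if PySem.Int.mod i 2 == 0 then (s.1, s.2 + i * i) else (s.1 + i * i, s.2)

def solution (k : Int) : Int :=
  let s := (PySem.List.pyRange 1 (k + 1) 1).foldl solutionStep (0, 0)
  s.2 - s.1

-- ===== PORT B =====
def solution_alt (k : Int) : Int :=
  if k < 1 then 0
  else
    let t := PySem.Int.floordiv (k * (k + 1)) 2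
    if PySem.Int.mod k 2 == 0 then t else -t

-- ===== PRECONDITION & SPEC =====
def Spec_solution (k : Int) (out : Int) : Prop := out = solution_alt k
instance (k : Int) (out : Int) : Decidable (Spec_solution k out) := by unfold Spec_solution; infer_instance

-- ===== CLAIM (what is proved, stated in full; the proofs are below) =====
def Claim_equal_solution : Prop := ∀ (k : Int), Dom_solution k → Spec_solution k (solution k)

-- ===== LEMMAS AND PROOFS =====

theorem solutionStep_diff (s : Int × Int) (i : Int) :
    (solutionStep s i).2 - (solutionStep s i).1 =
      s.2 - s.1 + (if PySem.Int.mod i 2 == 0 then i * i else -(i * i)) := by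
  unfold solutionStep
  split <;> simp <;> ring

-- 2 × (red − yellow) after the loop over 1..n, as a division-free closed form
theorem loop_diff (n : Nat) :
    2 * (((PySem.List.pyRange 1 ((n : Int) + 1) 1).foldl solutionStep (0, 0)).2 -
         ((PySem.List.pyRange 1 ((n : Int) + 1) 1).foldl solutionStep (0, 0)).1) =
      (if (n : Int) % 2 = 0 then (n : Int) * ((n : Int) + 1) else -((n : Int) * ((n : Int) + 1))) := by
  induction n with
  | zero =>
      simp [PySem.List.pyRange_one_eq_nil (a := 1) (b := 1) le_rfl]
  | succ m ih =>
      have hsplit : PySem.List.pyRange 1 (((m : Int) + 1) + 1) 1 =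
          PySem.List.pyRange 1 ((m : Int) + 1) 1 ++ [(m : Int) + 1] :=
        PySem.List.pyRange_one_succ_right (by omega)
      simp only [Nat.cast_succ] at *
      rw [hsplit, List.foldl_append]
      simp only [List.foldl]
      rw [show ∀ s : Int × Int, 2 * ((solutionStep s ((m:Int)+1)).2 - (solutionStep s ((m:Int)+1)).1)
            = 2 * (s.2 - s.1) + 2 * (if PySem.Int.mod ((m:Int)+1) 2 == 0 then ((m:Int)+1) * ((m:Int)+1) else -(((m:Int)+1) * ((m:Int)+1)))
          from fun s => by rw [solutionStep_diff]; ring]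
      rw [ih]
      have hmod : PySem.Int.mod ((m : Int) + 1) 2 = ((m : Int) + 1) % 2 :=
        PySem.Int.mod_eq_emod_of_pos (by omega)
      by_cases h : (m : Int) % 2 = 0
      · have h1 : ((m : Int) + 1) % 2 = 1 := by omega
        simp [h1, h]
        ring
      · have h1 : ((m : Int) + 1) % 2 = 0 := by omega
        simp [h1, h]
        ring

-- ===== VERDICT (by name: the statement is the Claim_ definition above) =====
theorem solution_spec : Claim_equal_solution := by
  intro k _
  unfold Spec_solution solution solution_alt
  by_cases hk : k < 1
  · rw [PySem.List.pyRange_one_eq_nil (by omega)]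
    simp [hk]
  · rw [not_lt] at hk
    obtain ⟨n, rfl⟩ : ∃ n : Nat, k = (n : Int) := ⟨k.toNat, by omega⟩
    have h2 := loop_diff n
    have hfd : PySem.Int.floordiv ((n : Int) * ((n : Int) + 1)) 2
        = ((n : Int) * ((n : Int) + 1)) / 2 :=
      PySem.Int.floordiv_eq_ediv_of_pos (by omega)
    have hmod : PySem.Int.mod (n : Int) 2 = (n : Int) % 2 :=
      PySem.Int.mod_eq_emod_of_pos (by omega)
    rw [if_neg (by omega : ¬ ((n : Int) < 1))]
    simp only [hfd, hmod]
    by_cases h : (n : Int) % 2 = 0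
    · rw [if_pos h] at h2
      simp only [beq_iff_eq]
      rw [if_pos h]
      omega
    · rw [if_neg h] at h2
      simp only [beq_iff_eq]
      rw [if_neg h]
      omega
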